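-- pv_equiv track=rewrite | github.com/jacksonahumphrey-glitch/studyflow | app.py | assignment_keyword_boost
-- ===== SOURCE A (Python) =====
-- def assignment_keyword_boost(title: str, task_type: str = "") -> int:
--     t = (title or "").lower()
--     tt = (task_type or "").lower()
--
--     score = 0
--
--     if any(k in t for k in ("exam", "final", "midterm")) or tt == "exam":
--         score = max(score, 35)
--
--     if "test" in t or tt == "test":
--         score = max(score, 32)
--
--     if "quiz" in t or tt == "quiz":
--         score = max(score, 20)
--
--     if any(k in t for k in ("essay", "paper")) or tt == "essay":
--         score = max(score, 24)
--
--     if "presentation" in t or tt == "presentation":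
--         score = max(score, 22)
--
--     if "project" in t or tt == "project":
--         score = max(score, 20)
--
--     if "homework" in t or tt == "homework":
--         score = max(score, 10)
--
--     if tt == "study":
--         score = max(score, 8)
--
--     return score
-- ===== SOURCE B (Python) =====
-- KEYWORD_SCORES = {
--     "exam": 35, "final": 35, "midterm": 35,
--     "test": 32,
--     "quiz": 20,
--     "essay": 24, "paper": 24,
--     "presentation": 22,
--     "project": 20,
--     "homework": 10,
-- }
--
-- TYPE_SCORES = {
--     "exam": 35, "test": 32, "quiz": 20, "essay": 24,
--     "presentation": 22, "project": 20, "homework": 10, "study": 8,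
-- }
--
--
-- def assignment_keyword_boost(title: str, task_type: str = "") -> int:
--     t = (title or "").lower()
--     best = TYPE_SCORES.get((task_type or "").lower(), 0)
--     # single left-to-right scan of the title: at each position, take any
--     # keyword that starts there and would improve the score
--     for i in range(len(t)):
--         for kw, s in KEYWORD_SCORES.items():
--             if s > best and t.startswith(kw, i):
--                 best = s
--     return best
-- ===== Notes on version B (the rewrite author's own statement) =====
-- stated objective: alternative
-- what changed: Instead of A's eight fixed branches of whole-title substring-membership tests or'ed with task-type equalities, B seeds a running best from a task_type->score dict and makes one left-to-right positional scan of the title, checking at each index which keyword of a keyword->score dict starts there (startswith) and keeping the max.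
import Mathlib
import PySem

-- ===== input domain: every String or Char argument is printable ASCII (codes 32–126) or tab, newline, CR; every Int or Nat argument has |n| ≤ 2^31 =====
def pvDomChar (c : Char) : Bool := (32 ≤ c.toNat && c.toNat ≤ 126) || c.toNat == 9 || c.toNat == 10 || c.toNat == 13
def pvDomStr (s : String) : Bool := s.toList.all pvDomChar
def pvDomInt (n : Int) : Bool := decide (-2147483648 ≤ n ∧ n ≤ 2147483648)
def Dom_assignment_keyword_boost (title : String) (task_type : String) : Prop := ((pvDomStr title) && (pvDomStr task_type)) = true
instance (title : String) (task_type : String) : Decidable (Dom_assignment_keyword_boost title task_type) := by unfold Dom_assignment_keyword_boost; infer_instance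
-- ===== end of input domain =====

-- B replaces A's eight hard-coded substring-membership branches by a single left-to-right
-- positional scan of the title (startswith at each index against a keyword→score dict, keeping
-- a running best), seeded from a task_type→score dict lookup (objective: alternative).

-- ===== PORT A =====
def assignment_keyword_boost (title : String) (task_type : String) : Int :=
  let t := PySem.Str.lower (if title == "" then "" else title)
  let tt := PySem.Str.lower (if task_type == "" then "" else task_type)
  let score : Int := 0
  let score := if ([("exam" : String), "final", "midterm"].any (fun k => PySem.Str.isIn k t)) || tt == "exam" then max score 35 else score
  let score := if PySem.Str.isIn "test" t || tt == "test" then max score 32 else score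
  let score := if PySem.Str.isIn "quiz" t || tt == "quiz" then max score 20 else score
  let score := if ([("essay" : String), "paper"].any (fun k => PySem.Str.isIn k t)) || tt == "essay" then max score 24 else score
  let score := if PySem.Str.isIn "presentation" t || tt == "presentation" then max score 22 else score
  let score := if PySem.Str.isIn "project" t || tt == "project" then max score 20 else score
  let score := if PySem.Str.isIn "homework" t || tt == "homework" then max score 10 else score
  let score := if tt == "study" then max score 8 else score
  score

-- ===== PORT B =====
def pvKeywordScores : List (List Char × Int) :=
  [("exam".toList, 35), ("final".toList, 35), ("midterm".toList, 35),
   ("test".toList, 32), ("quiz".toList, 20), ("essay".toList, 24), ("paper".toList, 24),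
   ("presentation".toList, 22), ("project".toList, 20), ("homework".toList, 10)]

def pvTypeScores : PySem.Dict String Int :=
  PySem.Dict.ofList
    [("exam", 35), ("test", 32), ("quiz", 20), ("essay", 24),
     ("presentation", 22), ("project", 20), ("homework", 10), ("study", 8)]

-- t.startswith(kw, i) for 0 ≤ i < len t is ported exactly as kw.isPrefixOf (t.drop i.toNat)
def assignment_keyword_boost_alt (title : String) (task_type : String) : Int :=
  let t := PySem.Chars.lower (if title == "" then "" else title).toList
  let best : Int := PySem.Dict.getD pvTypeScores (PySem.Str.lower (if task_type == "" then "" else task_type)) 0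
  (PySem.List.pyRange 0 (t.length : Int) 1).foldl
    (fun best i =>
      pvKeywordScores.foldl
        (fun best p => if decide (best < p.2) && p.1.isPrefixOf (t.drop i.toNat) then p.2 else best)
        best)
    best

-- ===== PRECONDITION & SPEC =====
def Spec_assignment_keyword_boost (title : String) (task_type : String) (out : Int) : Prop := out = assignment_keyword_boost_alt title task_type
instance (title : String) (task_type : String) (out : Int) : Decidable (Spec_assignment_keyword_boost title task_type out) := by unfold Spec_assignment_keyword_boost; infer_instance

-- ===== CLAIM =====
def Claim_equal_assignment_keyword_boost : Prop := ∀ (title : String) (task_type : String), Dom_assignment_keyword_boost title task_type → Spec_assignment_keyword_boost title task_type (assignment_keyword_boost title task_type)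

-- ===== LEMMAS AND PROOFS =====

-- L_prune: inner fold with the pruning guard equals the if/max fold
theorem pv_foldl_prune (R : List (List Char × Int)) (u : List Char) (b : Int) :
    R.foldl (fun b p => if decide (b < p.2) && p.1.isPrefixOf u then p.2 else b) b
  = R.foldl (fun b p => if p.1.isPrefixOf u then max b p.2 else b) b := by
  induction R generalizing b with
  | nil => rfl
  | cons p R ih =>
    simp only [List.foldl_cons]
    have h : (if decide (b < p.2) && p.1.isPrefixOf u then p.2 else b)
        = (if p.1.isPrefixOf u then max b p.2 else b) := by
      cases hc : p.1.isPrefixOf u <;> simp [hc] <;> omega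
    rw [h, ih]

-- L_filter: conditional max fold = plain max fold over the filtered scores
theorem pv_foldl_if_max (R : List (List Char × Int)) (c : List Char × Int → Bool) (b : Int) :
    R.foldl (fun b p => if c p then max b p.2 else b) b
  = ((R.filter c).map Prod.snd).foldl max b := by
  induction R generalizing b with
  | nil => rfl
  | cons p R ih =>
    cases hc : c p <;> simp [List.filter_cons, hc, ih]

-- L_flat: fold of folds = fold over flatMap
theorem pv_foldl_flat (P : List Int) (F : Int → List Int) (b : Int) :
    P.foldl (fun b i => (F i).foldl max b) b = (P.flatMap F).foldl max b := by
  induction P generalizing b with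
  | nil => rfl
  | cons i P ih => simp [List.foldl_append, ih]

-- L_cong: foldl max only depends on the set of elements
theorem pv_foldl_max_congr (L1 L2 : List Int) (b : Int) (h : ∀ x, x ∈ L1 ↔ x ∈ L2) :
    L1.foldl max b = L2.foldl max b := by
  apply le_antisymm
  · rcases PySem.List.foldl_max_mem L1 b with h1 | h1
    · rw [h1]; exact (PySem.List.le_foldl_max L2 b).1
    · exact (PySem.List.le_foldl_max L2 b).2 _ ((h _).mp h1)
  · rcases PySem.List.foldl_max_mem L2 b with h1 | h1
    · rw [h1]; exact (PySem.List.le_foldl_max L1 b).1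
    · exact (PySem.List.le_foldl_max L1 b).2 _ ((h _).mpr h1)

-- L_ex: existence of a matching position ↔ substring containment (nonempty keyword)
theorem pv_exists_prefix (t kw : List Char) (hkw : kw ≠ []) :
    (∃ i ∈ PySem.List.pyRange 0 (t.length : Int) 1, kw.isPrefixOf (t.drop i.toNat) = true)
  ↔ PySem.Chars.isIn kw t = true := by
  rw [← PySem.Chars.exists_prefix_drop_iff_isIn]
  constructor
  · rintro ⟨i, hi, hp⟩
    exact ⟨i.toNat, List.isPrefixOf_iff_prefix.mp hp⟩
  · rintro ⟨j, hj⟩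
    have hjlen : j < t.length := by
      by_contra hge
      rw [List.drop_eq_nil_of_le (by omega)] at hj
      exact hkw (List.prefix_nil.mp hj)
    refine ⟨(j : Int), ?_, ?_⟩
    · rw [PySem.List.mem_pyRange_one]; omega
    · simpa using List.isPrefixOf_iff_prefix.mpr hj
theorem pv_scan_eq (t : List Char) (b : Int) :
    (PySem.List.pyRange 0 (t.length : Int) 1).foldl
      (fun b i => pvKeywordScores.foldl
        (fun b p => if decide (b < p.2) && p.1.isPrefixOf (t.drop i.toNat) then p.2 else b) b) b
  = pvKeywordScores.foldl (fun b p => if PySem.Chars.isIn p.1 t then max b p.2 else b) b := by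
  have hne : ∀ p ∈ pvKeywordScores, p.1 ≠ [] := by decide
  have e1 : (fun (b i : Int) => pvKeywordScores.foldl
        (fun b p => if decide (b < p.2) && p.1.isPrefixOf (t.drop i.toNat) then p.2 else b) b)
      = (fun (b i : Int) =>
          ((pvKeywordScores.filter (fun p => p.1.isPrefixOf (t.drop i.toNat))).map Prod.snd).foldl max b) := by
    funext b i; rw [pv_foldl_prune, pv_foldl_if_max]
  rw [e1, pv_foldl_flat, pv_foldl_if_max]
  apply pv_foldl_max_congr
  intro x
  simp only [List.mem_flatMap, List.mem_map, List.mem_filter]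
  constructor
  · rintro ⟨i, hi, p, ⟨hpR, hpre⟩, rfl⟩
    exact ⟨p, ⟨hpR, (pv_exists_prefix t p.1 (hne p hpR)).mp ⟨i, hi, hpre⟩⟩, rfl⟩
  · rintro ⟨p, ⟨hpR, hin⟩, rfl⟩
    obtain ⟨i, hi, hp⟩ := (pv_exists_prefix t p.1 (hne p hpR)).mpr hin
    exact ⟨i, hi, p, ⟨hpR, hp⟩, rfl⟩

theorem pv_type_lookup (tt : String) :
    PySem.Dict.getD pvTypeScores tt 0 =
      (if tt == "exam" then 35 else if tt == "test" then 32 else if tt == "quiz" then 20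
       else if tt == "essay" then 24 else if tt == "presentation" then 22
       else if tt == "project" then 20 else if tt == "homework" then 10
       else if tt == "study" then 8 else 0) := by
  have hitems : pvTypeScores.items =
      [("exam", 35), ("test", 32), ("quiz", 20), ("essay", 24),
       ("presentation", 22), ("project", 20), ("homework", 10), ("study", 8)] := by decide
  simp only [PySem.Dict.getD, PySem.Dict.get?, hitems, List.find?_cons, List.find?_nil]
  by_cases h1 : tt = "exam" <;> by_cases h2 : tt = "test" <;> by_cases h3 : tt = "quiz" <;> by_cases h4 : tt = "essay" <;> by_cases h5 : tt = "presentation" <;> by_cases h6 : tt = "project" <;> by_cases h7 : tt = "homework" <;> by_cases h8 : tt = "study" <;> simp_all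
  have e1 : ("exam" == tt) = false := by simp [Ne.symm h1]
  have e2 : ("test" == tt) = false := by simp [Ne.symm h2]
  have e3 : ("quiz" == tt) = false := by simp [Ne.symm h3]
  have e4 : ("essay" == tt) = false := by simp [Ne.symm h4]
  have e5 : ("presentation" == tt) = false := by simp [Ne.symm h5]
  have e6 : ("project" == tt) = false := by simp [Ne.symm h6]
  have e7 : ("homework" == tt) = false := by simp [Ne.symm h7]
  have e8 : ("study" == tt) = false := by simp [Ne.symm h8]
  simp [e1,e2,e3,e4,e5,e6,e7,e8]

set_option maxHeartbeats 1000000 in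
-- ===== VERDICT (by name: the statement is the Claim_ definition above) =====
set_option maxHeartbeats 1000000 in
theorem assignment_keyword_boost_spec : Claim_equal_assignment_keyword_boost := by
  intro title task_type _
  unfold Spec_assignment_keyword_boost assignment_keyword_boost assignment_keyword_boost_alt
  rw [pv_scan_eq, pv_type_lookup]
  simp only [pvKeywordScores, List.foldl_cons, List.foldl_nil, List.any_cons, List.any_nil,
    Bool.or_false, PySem.Str.isIn_eq, PySem.Str.toList_lower]
  generalize PySem.Str.lower (if task_type == "" then "" else task_type) = tt
  generalize PySem.Chars.lower (if title == "" then "" else title).toList = T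
  generalize PySem.Chars.isIn "exam".toList T = b1
  generalize PySem.Chars.isIn "final".toList T = b2
  generalize PySem.Chars.isIn "midterm".toList T = b3
  generalize PySem.Chars.isIn "test".toList T = b4
  generalize PySem.Chars.isIn "quiz".toList T = b5
  generalize PySem.Chars.isIn "essay".toList T = b6
  generalize PySem.Chars.isIn "paper".toList T = b7
  generalize PySem.Chars.isIn "presentation".toList T = b8
  generalize PySem.Chars.isIn "project".toList T = b9
  generalize PySem.Chars.isIn "homework".toList T = b10
  by_cases h1 : tt = "exam"
  · subst h1; revert b1 b2 b3 b4 b5 b6 b7 b8 b9 b10; decide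
  by_cases h2 : tt = "test"
  · subst h2; revert b1 b2 b3 b4 b5 b6 b7 b8 b9 b10; decide
  by_cases h3 : tt = "quiz"
  · subst h3; revert b1 b2 b3 b4 b5 b6 b7 b8 b9 b10; decide
  by_cases h4 : tt = "essay"
  · subst h4; revert b1 b2 b3 b4 b5 b6 b7 b8 b9 b10; decide
  by_cases h5 : tt = "presentation"
  · subst h5; revert b1 b2 b3 b4 b5 b6 b7 b8 b9 b10; decide
  by_cases h6 : tt = "project"
  · subst h6; revert b1 b2 b3 b4 b5 b6 b7 b8 b9 b10; decide
  by_cases h7 : tt = "homework"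
  · subst h7; revert b1 b2 b3 b4 b5 b6 b7 b8 b9 b10; decide
  by_cases h8 : tt = "study"
  · subst h8; revert b1 b2 b3 b4 b5 b6 b7 b8 b9 b10; decide
  have e1 : (tt == "exam") = false := by simp [h1]
  have e2 : (tt == "test") = false := by simp [h2]
  have e3 : (tt == "quiz") = false := by simp [h3]
  have e4 : (tt == "essay") = false := by simp [h4]
  have e5 : (tt == "presentation") = false := by simp [h5]
  have e6 : (tt == "project") = false := by simp [h6]
  have e7 : (tt == "homework") = false := by simp [h7]
  have e8 : (tt == "study") = false := by simp [h8]
  simp only [e1,e2,e3,e4,e5,e6,e7,e8, Bool.false_or, Bool.or_false, if_false]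
  revert b1 b2 b3 b4 b5 b6 b7 b8 b9 b10; decide
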